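-- pv_equiv track=rewrite | github.com/jxzly/Aureka-AIntibody-Challenges | utils/torch_utils.py | calculate_max_lengths
-- ===== SOURCE A (Python) =====
-- def calculate_max_lengths(lengths):
--     # Step 1: Initialize max_token_len and max_atom_len
--     max_token_len = max(token_len for token_len, _ in lengths)
--     max_atom_len = max(atom_len for _, atom_len in lengths)
--
--     # Step 2: Adjust max_atom_len to satisfy the second condition
--     for token_len, atom_len in lengths:
--         required_padding_tokens = max_token_len - token_len
--         available_padding_atoms = max_atom_len - atom_len
--
--         if required_padding_tokens > available_padding_atoms:
--             # Increase max_atom_len to ensure max_atom_len - atom_len >= max_token_len - token_len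
--             max_atom_len += required_padding_tokens - available_padding_atoms
--
--     # Step 3: Extra check for the case where max_token_len - token_len == 0
--     for token_len, atom_len in lengths:
--         if token_len == max_token_len and atom_len < max_atom_len:
--             # # If a sample has max_token_len but atom_len is smaller
--             ## 1 more token for leave atoms
--             max_atom_len = max_atom_len + 1
--             max_token_len = max_token_len + 1
--
--     # Step 4: Return the final max_token_len and max_atom_len
--     return max_token_len, max_atom_len
-- ===== SOURCE B (Python) =====
-- def calculate_max_lengths(lengths):
--     # Single left-to-right pass: track the running max token length T, the minimum
--     # atom length A_min among elements attaining T, and the max gap d = a - t.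
--     # The result is (T, T + d), both bumped by 1 when A_min < T + d.
--     t0, a0 = lengths[0]
--     T, A_min, d = t0, a0, a0 - t0
--     for t, a in lengths[1:]:
--         if t > T:
--             T, A_min = t, a
--         elif t == T and a < A_min:
--             A_min = a
--         if a - t > d:
--             d = a - t
--     M = T + d
--     if A_min < M:
--         return T + 1, M + 1
--     return T, M
-- ===== Notes on version B (the rewrite author's own statement) =====
-- stated objective: alternative
-- what changed: Replaces A's four staged passes (two maxes, a conditional-mutation padding loop, a double-increment scan) by one single pass maintaining a three-part accumulator (running max token length T, min atom length among elements attaining T, max gap a-t), from which the answer and the at-most-once bump are read off directly.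
import Mathlib
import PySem

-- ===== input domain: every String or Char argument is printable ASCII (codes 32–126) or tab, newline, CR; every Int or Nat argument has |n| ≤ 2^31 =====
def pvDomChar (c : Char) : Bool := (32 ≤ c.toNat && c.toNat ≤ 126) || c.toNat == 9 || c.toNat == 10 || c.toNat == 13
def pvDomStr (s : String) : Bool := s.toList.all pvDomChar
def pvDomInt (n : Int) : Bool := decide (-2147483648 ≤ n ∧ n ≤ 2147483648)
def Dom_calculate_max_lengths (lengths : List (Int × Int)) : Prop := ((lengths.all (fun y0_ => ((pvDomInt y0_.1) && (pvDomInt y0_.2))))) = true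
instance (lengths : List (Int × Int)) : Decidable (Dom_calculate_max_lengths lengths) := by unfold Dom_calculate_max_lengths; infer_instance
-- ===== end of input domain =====

-- B replaces A's four staged passes by ONE pass with a three-part accumulator
-- (running max token length, min atom length among its attainers, max gap a - t); objective: alternative.

-- ===== PORT A =====
def calculate_max_lengths (lengths : List (Int × Int)) : Int × Int :=
  -- Step 1 (Python max raises ValueError on []: Pre_ excludes the empty list; .getD 0 is never reached under Pre_)
  let max_token_len : Int := (PySem.List.max? (lengths.map (fun p => p.1)) (fun x => x)).getD 0
  let max_atom_len0 : Int := (PySem.List.max? (lengths.map (fun p => p.2)) (fun x => x)).getD 0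
  -- Step 2
  let max_atom_len : Int := lengths.foldl (fun m p =>
      let required_padding_tokens := max_token_len - p.1
      let available_padding_atoms := m - p.2
      if available_padding_atoms < required_padding_tokens then
        m + (required_padding_tokens - available_padding_atoms)
      else m) max_atom_len0
  -- Step 3
  lengths.foldl (fun s p => if p.1 = s.1 ∧ p.2 < s.2 then (s.1 + 1, s.2 + 1) else s)
    (max_token_len, max_atom_len)

-- ===== PORT B =====
-- loop body of Source B: state (T, A_min, d)
def pvBStep (s : Int × Int × Int) (p : Int × Int) : Int × Int × Int :=
  let s1 : Int × Int × Int :=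
    if s.1 < p.1 then (p.1, p.2, s.2.2)
    else if p.1 = s.1 ∧ p.2 < s.2.1 then (s.1, p.2, s.2.2)
    else s
  if s1.2.2 < p.2 - p.1 then (s1.1, s1.2.1, p.2 - p.1) else s1

def calculate_max_lengths_alt (lengths : List (Int × Int)) : Int × Int :=
  match lengths with
  | [] => (0, 0)  -- unreachable under Pre_: Python B raises IndexError on lengths[0]
  | x :: rest =>
    let r := rest.foldl pvBStep (x.1, x.2, x.2 - x.1)
    let M := r.1 + r.2.2
    if r.2.1 < M then (r.1 + 1, M + 1) else (r.1, M)

-- ===== PRECONDITION & SPEC =====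
-- Both programs raise on the empty list (A: ValueError from max; B: IndexError from lengths[0]); Pre_ excludes exactly that.
def Pre_calculate_max_lengths (lengths : List (Int × Int)) : Prop := lengths ≠ []
instance (lengths : List (Int × Int)) : Decidable (Pre_calculate_max_lengths lengths) := by unfold Pre_calculate_max_lengths; infer_instance
def pvWitness_calculate_max_lengths : (List (Int × Int)) := [(3, 5), (2, 1)]

def Spec_calculate_max_lengths (lengths : List (Int × Int)) (out : Int × Int) : Prop := out = calculate_max_lengths_alt lengths
instance (lengths : List (Int × Int)) (out : Int × Int) : Decidable (Spec_calculate_max_lengths lengths out) := by unfold Spec_calculate_max_lengths; infer_instance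

-- ===== CLAIM (what is proved, stated in full; the proofs are below) =====
def Claim_equal_calculate_max_lengths : Prop := ∀ (lengths : List (Int × Int)), Dom_calculate_max_lengths lengths → Pre_calculate_max_lengths lengths → Spec_calculate_max_lengths lengths (calculate_max_lengths lengths)

-- ===== LEMMAS AND PROOFS =====

-- A's step-2 body is a running max of f p := p.2 + T - p.1
theorem step2_is_max (T : Int) (l : List (Int × Int)) (m : Int) :
    l.foldl (fun m p =>
      let required_padding_tokens := T - p.1
      let available_padding_atoms := m - p.2
      if available_padding_atoms < required_padding_tokens then
        m + (required_padding_tokens - available_padding_atoms)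
      else m) m
    = l.foldl (fun m p => max m (p.2 + T - p.1)) m := by
  induction l generalizing m with
  | nil => rfl
  | cons p t ih =>
    simp only [List.foldl_cons]
    rw [ih]
    congr 1
    dsimp only
    split_ifs with h <;> omega

-- pulling a max out of a running-max fold
theorem foldl_max_init {α : Type} (f : α → Int) (l : List α) (a b : Int) :
    l.foldl (fun m p => max m (f p)) (max a b) = max a (l.foldl (fun m p => max m (f p)) b) := by
  induction l generalizing b with
  | nil => rfl
  | cons p t ih =>
    simp only [List.foldl_cons, max_assoc]
    exact ih (max b (f p))

-- shifting a running-max fold by a constant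
theorem foldl_max_shift {α : Type} (g : α → Int) (l : List α) (c a : Int) :
    (l.map (fun p => g p + c)).foldl max (a + c) = (l.map g).foldl max a + c := by
  induction l generalizing a with
  | nil => rfl
  | cons p t ih =>
    simp only [List.map_cons, List.foldl_cons]
    rw [show max (a + c) (g p + c) = max a (g p) + c from by omega]
    exact ih _

-- step-3 loop is inert once every first component is below the state's first component
theorem step3_inert (l : List (Int × Int)) (s : Int × Int) (h : ∀ p ∈ l, p.1 < s.1) :
    l.foldl (fun s p => if p.1 = s.1 ∧ p.2 < s.2 then (s.1 + 1, s.2 + 1) else s) s = s := by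
  induction l with
  | nil => rfl
  | cons p t ih =>
    have hp := h p (by simp)
    simp only [List.foldl_cons]
    rw [if_neg (by omega)]
    exact ih (fun q hq => h q (by simp [hq]))

-- step-3 loop fires at most once: it is an existence test
theorem step3_is_any (l : List (Int × Int)) (T M : Int) (h : ∀ p ∈ l, p.1 ≤ T) :
    l.foldl (fun s p => if p.1 = s.1 ∧ p.2 < s.2 then (s.1 + 1, s.2 + 1) else s) (T, M)
    = if l.any (fun p => p.1 == T && decide (p.2 < M)) then (T + 1, M + 1) else (T, M) := by
  induction l with
  | nil => rfl
  | cons p t ih =>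
    have hp := h p (by simp)
    simp only [List.foldl_cons, List.any_cons]
    by_cases hc : p.1 = T ∧ p.2 < M
    · rw [if_pos hc]
      rw [step3_inert t (T + 1, M + 1) (fun q hq => by have := h q (by simp [hq]); omega)]
      have : (p.1 == T && decide (p.2 < M)) = true := by
        rw [hc.1]; simp [hc.2]
      simp [this]
    · rw [if_neg hc]
      rw [ih (fun q hq => h q (by simp [hq]))]
      have : (p.1 == T && decide (p.2 < M)) = false := by
        by_cases h1 : p.1 = T
        · have h2 : ¬ p.2 < M := fun h2 => hc ⟨h1, h2⟩
          simp [h1, h2]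
        · simp [h1]
      simp only [this, Bool.false_or]

-- characterization of B's single-pass accumulator
theorem bfold_char (l : List (Int × Int)) (T0 Am0 d0 : Int) :
    (l.foldl pvBStep (T0, Am0, d0)).1 = (l.map Prod.fst).foldl max T0
    ∧ (l.foldl pvBStep (T0, Am0, d0)).2.2 = (l.map (fun p => p.2 - p.1)).foldl max d0
    ∧ (((l.foldl pvBStep (T0, Am0, d0)).1 = T0 ∧ (l.foldl pvBStep (T0, Am0, d0)).2.1 = Am0)
        ∨ ∃ p ∈ l, p.1 = (l.foldl pvBStep (T0, Am0, d0)).1 ∧ p.2 = (l.foldl pvBStep (T0, Am0, d0)).2.1)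
    ∧ (∀ p ∈ l, p.1 = (l.foldl pvBStep (T0, Am0, d0)).1 → (l.foldl pvBStep (T0, Am0, d0)).2.1 ≤ p.2)
    ∧ ((l.foldl pvBStep (T0, Am0, d0)).1 = T0 → (l.foldl pvBStep (T0, Am0, d0)).2.1 ≤ Am0)
    ∧ T0 ≤ (l.foldl pvBStep (T0, Am0, d0)).1 := by
  induction l generalizing T0 Am0 d0 with
  | nil => refine ⟨rfl, rfl, Or.inl ⟨rfl, rfl⟩, by simp, fun _ => le_refl _, le_refl _⟩
  | cons p t ih =>
    simp only [List.foldl_cons, List.map_cons]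
    have hstep : pvBStep (T0, Am0, d0) p =
        ((if T0 < p.1 then p.1 else T0,
          if T0 < p.1 then p.2 else if p.1 = T0 ∧ p.2 < Am0 then p.2 else Am0,
          max d0 (p.2 - p.1)) : Int × Int × Int) := by
      unfold pvBStep
      dsimp only
      split_ifs <;> simp_all <;> omega
    rw [hstep]
    by_cases h1 : T0 < p.1
    · rw [if_pos h1, if_pos h1]
      obtain ⟨iT, id, iEx, iMin, iSelf, iLe⟩ := ih p.1 p.2 (max d0 (p.2 - p.1))
      refine ⟨by rw [iT]; congr 1; omega,
              by rw [id],
              ?_, ?_, ?_, by omega⟩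
      · rcases iEx with ⟨hT, hA⟩ | ⟨q, hq, hq1, hq2⟩
        · exact Or.inr ⟨p, by simp, by omega, by omega⟩
        · exact Or.inr ⟨q, by simp [hq], hq1, hq2⟩
      · intro q hq hq1
        rcases List.mem_cons.mp hq with rfl | hq
        · exact iSelf (by omega)
        · exact iMin q hq hq1
      · intro hT; omega
    · rw [if_neg h1, if_neg h1]
      by_cases h2 : p.1 = T0 ∧ p.2 < Am0
      · rw [if_pos h2]
        obtain ⟨iT, id, iEx, iMin, iSelf, iLe⟩ := ih T0 p.2 (max d0 (p.2 - p.1))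
        refine ⟨by rw [iT]; congr 1; omega,
                by rw [id],
                ?_, ?_, ?_, iLe⟩
        · rcases iEx with ⟨hT, hA⟩ | ⟨q, hq, hq1, hq2⟩
          · exact Or.inr ⟨p, by simp, by omega, by omega⟩
          · exact Or.inr ⟨q, by simp [hq], hq1, hq2⟩
        · intro q hq hq1
          rcases List.mem_cons.mp hq with rfl | hq
          · have := iSelf (by omega); omega
          · exact iMin q hq hq1
        · intro hT; have := iSelf hT; omega
      · rw [if_neg h2]
        obtain ⟨iT, id, iEx, iMin, iSelf, iLe⟩ := ih T0 Am0 (max d0 (p.2 - p.1))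
        refine ⟨by rw [iT]; congr 1; omega,
                by rw [id],
                ?_, ?_, ?_, iLe⟩
        · rcases iEx with ⟨hT, hA⟩ | ⟨q, hq, hq1, hq2⟩
          · exact Or.inl ⟨hT, hA⟩
          · exact Or.inr ⟨q, by simp [hq], hq1, hq2⟩
        · intro q hq hq1
          rcases List.mem_cons.mp hq with rfl | hq
          · have hqT : q.1 = T0 := by omega
            have := iSelf (by omega)
            omega
          · exact iMin q hq hq1
        · exact iSelf

theorem calc_spec_aux (lengths : List (Int × Int)) (hne : lengths ≠ []) :
    calculate_max_lengths lengths = calculate_max_lengths_alt lengths := by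
  obtain ⟨x, t, rfl⟩ := List.exists_cons_of_ne_nil hne
  unfold calculate_max_lengths calculate_max_lengths_alt
  simp only [List.map_cons, PySem.List.max?_id_cons, Option.getD_some]
  set T : Int := (t.map (fun p => p.1)).foldl max x.1 with hT
  set M0 : Int := (t.map (fun p => p.2)).foldl max x.2 with hM0
  set f : Int × Int → Int := fun p => p.2 + T - p.1 with hf
  set B : Int := (t.map f).foldl max (f x) with hB
  -- every first component is ≤ T
  have hTmax : ∀ p ∈ x :: t, p.1 ≤ T := by
    intro p hp
    rcases List.mem_cons.mp hp with h | h
    · rw [h]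
      exact (PySem.List.le_foldl_max (t.map (fun p => p.1)) x.1).1
    · exact (PySem.List.le_foldl_max (t.map (fun p => p.1)) x.1).2 _ (List.mem_map_of_mem h)
  -- B bounds f from above over the whole list
  have hBmax : ∀ p ∈ x :: t, f p ≤ B := by
    intro p hp
    rcases List.mem_cons.mp hp with h | h
    · rw [h]
      exact (PySem.List.le_foldl_max (t.map f) (f x)).1
    · exact (PySem.List.le_foldl_max (t.map f) (f x)).2 _ (List.mem_map_of_mem h)
  -- M0 ≤ B
  have hM0B : M0 ≤ B := by
    rcases PySem.List.foldl_max_mem (t.map (fun p => p.2)) x.2 with h | h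
    · have := hBmax x (by simp)
      have hx1 : x.1 ≤ T := hTmax x (by simp)
      simp only [hf] at this; omega
    · obtain ⟨p, hp, hpe⟩ := List.mem_map.mp h
      rw [hM0]
      have := hBmax p (by simp [hp])
      have hp1 : p.1 ≤ T := hTmax p (by simp [hp])
      simp only [hf] at this; omega
  -- A: step 2 computes B
  have hstep2 :
      (x :: t).foldl (fun m p =>
        let required_padding_tokens := T - p.1
        let available_padding_atoms := m - p.2
        if available_padding_atoms < required_padding_tokens then
          m + (required_padding_tokens - available_padding_atoms)
        else m) M0 = B := by
    rw [step2_is_max]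
    simp only [List.foldl_cons]
    have h2 : t.foldl (fun m p => max m (p.2 + T - p.1)) (max M0 (f x))
        = max M0 (t.foldl (fun m p => max m (f p)) (f x)) := foldl_max_init f t M0 (f x)
    rw [show (fun m (p : Int × Int) => max m (p.2 + T - p.1)) = (fun m p => max m (f p)) from rfl]
    rw [h2]
    rw [show t.foldl (fun m p => max m (f p)) (f x) = B from by rw [hB, List.foldl_map]]
    exact max_eq_right hM0B
  rw [hstep2]
  rw [step3_is_any (x :: t) T B hTmax]
  -- B side: characterize the single-pass fold
  obtain ⟨rT, rd, rEx, rMin, rSelf, _⟩ := bfold_char t x.1 x.2 (x.2 - x.1)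
  set r := t.foldl pvBStep (x.1, x.2, x.2 - x.1) with hr
  have hrT : r.1 = T := by rw [rT]
  -- r.1 + r.2.2 = B
  have hrM : r.1 + r.2.2 = B := by
    have hfe : f = (fun p : Int × Int => (p.2 - p.1) + T) := funext fun p => by simp only [hf]; ring
    have hsh := foldl_max_shift (fun p : Int × Int => p.2 - p.1) t T (x.2 - x.1)
    rw [hrT, rd, hB, hfe]
    dsimp only
    rw [hsh]
    ring
  -- the bump conditions agree
  have hcond : ((x :: t).any (fun p => p.1 == T && decide (p.2 < B)) = true) ↔ r.2.1 < r.1 + r.2.2 := by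
    rw [hrM, List.any_eq_true]
    constructor
    · rintro ⟨p, hp, hpb⟩
      obtain ⟨hp1, hp2⟩ : p.1 = T ∧ p.2 < B := by simpa using hpb
      rcases List.mem_cons.mp hp with rfl | hpt
      · have := rSelf (by omega)
        omega
      · have := rMin p hpt (by omega)
        omega
    · intro hlt
      rcases rEx with ⟨h1, h2⟩ | ⟨q, hq, hq1, hq2⟩
      · refine ⟨x, List.mem_cons_self .., ?_⟩
        have e1 : x.1 = T := by omega
        have e2 : x.2 < B := by omega
        simp [e1, e2]
      · refine ⟨q, List.mem_cons_of_mem x hq, ?_⟩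
        have e1 : q.1 = T := by omega
        have e2 : q.2 < B := by omega
        simp [e1, e2]
  by_cases hc : r.2.1 < r.1 + r.2.2
  · rw [if_pos hc, if_pos (hcond.mpr hc)]
    exact Prod.ext (by omega) (by omega)
  · rw [if_neg hc, if_neg (fun h => hc (hcond.mp h))]
    exact Prod.ext (by omega) (by omega)

-- ===== VERDICT (by name: the statement is the Claim_ definition above) =====
theorem calculate_max_lengths_spec : Claim_equal_calculate_max_lengths := by
  intro lengths _ hpre
  unfold Spec_calculate_max_lengths
  exact calc_spec_aux lengths hpre
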